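-- pv_equiv track=rewrite | github.com/taylanpince/family-recipes | scripts/add_placeholder_images.py | emoji_for_tags
-- ===== SOURCE A (Python) =====
-- def emoji_for_tags(tags: list[str]) -> str:
--     t = {x.strip().lower() for x in tags}
--     if "soup" in t or "stock" in t:
--         return "🥣"
--     if "salad" in t:
--         return "🥗"
--     if "breakfast" in t or "pancakes" in t:
--         return "🥞"
--     if "fish" in t:
--         return "🐟"
--     if "chicken" in t:
--         return "🍗"
--     if "dumplings" in t:
--         return "🥟"
--     if "meatballs" in t:
--         return "🧆"
--     if "vegetarian" in t:
--         return "🥕"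
--     if "stew" in t:
--         return "🍲"
--     if "turkish" in t:
--         return "🧿"
--     return "🍽️"
-- ===== SOURCE B (Python) =====
-- KEYWORD = {
--     "soup": (0, "\U0001F963"), "stock": (0, "\U0001F963"),
--     "salad": (1, "\U0001F957"),
--     "breakfast": (2, "\U0001F95E"), "pancakes": (2, "\U0001F95E"),
--     "fish": (3, "\U0001F41F"),
--     "chicken": (4, "\U0001F357"),
--     "dumplings": (5, "\U0001F95F"),
--     "meatballs": (6, "\U0001F9C6"),
--     "vegetarian": (7, "\U0001F955"),
--     "stew": (8, "\U0001F372"),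
--     "turkish": (9, "\U0001F9FF"),
-- }
--
--
-- def emoji_for_tags(tags: list[str]) -> str:
--     # single pass over the raw tag list, tracking the highest-priority match seen
--     best = (10, "\U0001F37D\uFE0F")
--     for x in tags:
--         c = KEYWORD.get(x.strip().lower())
--         if c is not None and c[0] < best[0]:
--             best = c
--     return best[1]
-- ===== Notes on version B (the rewrite author's own statement) =====
-- stated objective: alternative
-- what changed: Instead of building a normalized-tag set and probing it with a hardcoded priority if-chain, B makes a single pass over the raw tag list, looking each normalized tag up in a keyword->(rank, emoji) dict and tracking the best-ranked match in an accumulator, returning its emoji.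
import Mathlib
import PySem

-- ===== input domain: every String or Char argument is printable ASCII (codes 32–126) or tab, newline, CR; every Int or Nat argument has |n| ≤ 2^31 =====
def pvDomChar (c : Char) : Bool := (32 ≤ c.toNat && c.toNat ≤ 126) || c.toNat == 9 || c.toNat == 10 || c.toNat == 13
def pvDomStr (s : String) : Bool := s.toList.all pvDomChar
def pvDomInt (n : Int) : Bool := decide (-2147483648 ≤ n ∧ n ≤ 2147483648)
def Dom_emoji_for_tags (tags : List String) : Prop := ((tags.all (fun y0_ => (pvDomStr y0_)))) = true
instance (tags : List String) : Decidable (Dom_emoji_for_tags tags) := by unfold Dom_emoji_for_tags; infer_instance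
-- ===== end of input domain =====

-- B replaces A's set-then-if-chain with a single pass over the raw tag list that
-- tracks the best-ranked dict match in an accumulator (objective: alternative).

-- ===== PORT A =====
def emoji_for_tags (tags : List String) : String :=
  let t : PySem.Set String := PySem.Set.ofList (tags.map (fun x => PySem.Str.lower (PySem.Str.strip x)))
  if PySem.Set.contains t "soup" || PySem.Set.contains t "stock" then "🥣"
  else if PySem.Set.contains t "salad" then "🥗"
  else if PySem.Set.contains t "breakfast" || PySem.Set.contains t "pancakes" then "🥞"
  else if PySem.Set.contains t "fish" then "🐟"
  else if PySem.Set.contains t "chicken" then "🍗"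
  else if PySem.Set.contains t "dumplings" then "🥟"
  else if PySem.Set.contains t "meatballs" then "🧆"
  else if PySem.Set.contains t "vegetarian" then "🥕"
  else if PySem.Set.contains t "stew" then "🍲"
  else if PySem.Set.contains t "turkish" then "🧿"
  else "🍽️"

-- ===== PORT B =====
-- the KEYWORD dict of Source B: keyword ↦ (priority rank, emoji)
def pvKeyword : PySem.Dict String (Int × String) :=
  PySem.Dict.ofList
    [ ("soup", (0, "🥣")), ("stock", (0, "🥣")),
      ("salad", (1, "🥗")),
      ("breakfast", (2, "🥞")), ("pancakes", (2, "🥞")),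
      ("fish", (3, "🐟")),
      ("chicken", (4, "🍗")),
      ("dumplings", (5, "🥟")),
      ("meatballs", (6, "🧆")),
      ("vegetarian", (7, "🥕")),
      ("stew", (8, "🍲")),
      ("turkish", (9, "🧿")) ]

-- the loop body: keep the better-ranked of the current best and this tag's match (if any)
def pvStep (best : Int × String) (x : String) : Int × String :=
  match PySem.Dict.get? pvKeyword (PySem.Str.lower (PySem.Str.strip x)) with
  | some c => if c.1 < best.1 then c else best
  | none => best

def emoji_for_tags_alt (tags : List String) : String :=
  (tags.foldl pvStep ((10 : Int), "🍽️")).2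

-- ===== PRECONDITION & SPEC =====
def Spec_emoji_for_tags (tags : List String) (out : String) : Prop := out = emoji_for_tags_alt tags
instance (tags : List String) (out : String) : Decidable (Spec_emoji_for_tags tags out) := by unfold Spec_emoji_for_tags; infer_instance

-- ===== CLAIM (what is proved, stated in full; the proofs are below) =====
def Claim_equal_emoji_for_tags : Prop := ∀ (tags : List String), Dom_emoji_for_tags tags → Spec_emoji_for_tags tags (emoji_for_tags tags)

-- ===== LEMMAS AND PROOFS =====

-- the emoji attached to each priority rank
def pvEmojiOf (r : Int) : String :=
  if r = 0 then "🥣" else if r = 1 then "🥗" else if r = 2 then "🥞"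
  else if r = 3 then "🐟" else if r = 4 then "🍗" else if r = 5 then "🥟"
  else if r = 6 then "🧆" else if r = 7 then "🥕" else if r = 8 then "🍲"
  else if r = 9 then "🧿" else "🍽️"

-- the rank a value option carries, 10 for no match
def pvRkOf (o : Option (Int × String)) : Int :=
  match o with
  | some c => c.1
  | none => 10

-- the rank of a (normalized) string
def pvRk (s : String) : Int := pvRkOf (PySem.Dict.get? pvKeyword s)

set_option maxHeartbeats 1000000 in
theorem pvKeyword_items : pvKeyword.items =
    [ ("soup", (0, "🥣")), ("stock", (0, "🥣")), ("salad", (1, "🥗")),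
      ("breakfast", (2, "🥞")), ("pancakes", (2, "🥞")), ("fish", (3, "🐟")),
      ("chicken", (4, "🍗")), ("dumplings", (5, "🥟")), ("meatballs", (6, "🧆")),
      ("vegetarian", (7, "🥕")), ("stew", (8, "🍲")), ("turkish", (9, "🧿")) ] := by
  decide

-- any value stored in the dict is a coherent (rank, emoji) pair with rank in [0, 9]
theorem pvVal_spec (s : String) (c : Int × String)
    (h : PySem.Dict.get? pvKeyword s = some c) :
    0 ≤ c.1 ∧ c.1 ≤ 9 ∧ c.2 = pvEmojiOf c.1 := by
  have hm := PySem.Dict.mem_items_of_get?_eq_some _ h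
  rw [pvKeyword_items] at hm
  simp only [List.mem_cons, List.not_mem_nil, or_false] at hm
  rcases hm with hm | hm | hm | hm | hm | hm | hm | hm | hm | hm | hm | hm <;>
    (injection hm with h1 h2; subst h2; refine ⟨by norm_num, by norm_num, by decide⟩)

theorem pvRk_nonneg (s : String) : 0 ≤ pvRk s := by
  unfold pvRk
  rcases h : PySem.Dict.get? pvKeyword s with _ | c
  · simp [pvRkOf]
  · simpa [pvRkOf] using (pvVal_spec s c h).1

-- the rank is at least i when no keyword of smaller rank equals s
theorem pvRk_ge (s : String) (i : Int) (hi : i ≤ 10)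
    (h : ∀ p ∈ pvKeyword.items, p.2.1 < i → p.1 ≠ s) : i ≤ pvRk s := by
  unfold pvRk
  rcases hg : PySem.Dict.get? pvKeyword s with _ | c
  · simpa [pvRkOf] using hi
  · have hm := PySem.Dict.mem_items_of_get?_eq_some _ hg
    simp only [pvRkOf]
    by_contra hlt
    have hk : (s, c).1 = s := rfl
    exact h (s, c) hm (by show c.1 < i; omega) hk

set_option maxHeartbeats 1000000 in
theorem pvStep_spec (b1 : Int) (x : String) (h0 : 0 ≤ b1) (h10 : b1 ≤ 10) :
    pvStep (b1, pvEmojiOf b1) x = (min b1 (pvRk (PySem.Str.lower (PySem.Str.strip x))),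
                  pvEmojiOf (min b1 (pvRk (PySem.Str.lower (PySem.Str.strip x))))) := by
  unfold pvStep pvRk
  rcases h : PySem.Dict.get? pvKeyword (PySem.Str.lower (PySem.Str.strip x)) with _ | c
  · simp only [pvRkOf]
    rw [min_eq_left h10]
  · obtain ⟨hc0, hc9, hce⟩ := pvVal_spec _ c h
    simp only [pvRkOf]
    obtain ⟨c1, c2⟩ := c
    simp only at hc0 hc9 hce
    subst hce
    split_ifs with hlt
    · rw [min_eq_right (by omega)]
    · rw [min_eq_left (by omega)]

-- the fold computes (minimum rank of the normalized tags, its emoji)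
set_option maxHeartbeats 1000000 in
theorem pvFold_spec (L : List String) : ∀ (b1 : Int), 0 ≤ b1 → b1 ≤ 10 →
    L.foldl pvStep (b1, pvEmojiOf b1) =
      (L.foldl (fun a x => min a (pvRk (PySem.Str.lower (PySem.Str.strip x)))) b1,
       pvEmojiOf (L.foldl (fun a x => min a (pvRk (PySem.Str.lower (PySem.Str.strip x)))) b1)) := by
  induction L with
  | nil => intro b1 h0 h10; simp [List.foldl]
  | cons x L ih =>
    intro b1 h0 h10
    simp only [List.foldl_cons]
    rw [pvStep_spec b1 x h0 h10]
    exact ih (min b1 (pvRk (PySem.Str.lower (PySem.Str.strip x))))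
      (le_min h0 (pvRk_nonneg _)) (le_trans (min_le_left _ _) h10)

-- minimum-rank fold: ≤ i iff the seed is or some tag's rank is
theorem pvMin_le_iff (L : List String) : ∀ (b i : Int),
    L.foldl (fun a x => min a (pvRk (PySem.Str.lower (PySem.Str.strip x)))) b ≤ i ↔
      b ≤ i ∨ ∃ x ∈ L, pvRk (PySem.Str.lower (PySem.Str.strip x)) ≤ i := by
  induction L with
  | nil => intro b i; simp
  | cons y L ih =>
    intro b i
    simp only [List.foldl_cons, ih, min_le_iff, List.mem_cons]
    constructor
    · rintro ((h | h) | ⟨s, hs, hr⟩)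
      · exact Or.inl h
      · exact Or.inr ⟨y, Or.inl rfl, h⟩
      · exact Or.inr ⟨s, Or.inr hs, hr⟩
    · rintro (h | ⟨s, (rfl | hs), hr⟩)
      · exact Or.inl (Or.inl h)
      · exact Or.inl (Or.inr hr)
      · exact Or.inr ⟨s, hs, hr⟩

-- the minimum rank is exactly i when some tag reaches i and none beats it
theorem pvMin_eq_of (L : List String) (i : Int) (h10 : i ≤ 10)
    (hex : i = 10 ∨ ∃ x ∈ L, pvRk (PySem.Str.lower (PySem.Str.strip x)) = i)
    (hlo : ∀ x ∈ L, i ≤ pvRk (PySem.Str.lower (PySem.Str.strip x))) :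
    L.foldl (fun a x => min a (pvRk (PySem.Str.lower (PySem.Str.strip x)))) 10 = i := by
  have hub : L.foldl (fun a x => min a (pvRk (PySem.Str.lower (PySem.Str.strip x)))) 10 ≤ i := by
    rw [pvMin_le_iff]
    rcases hex with rfl | ⟨s, hs, hr⟩
    · exact Or.inl le_rfl
    · exact Or.inr ⟨s, hs, le_of_eq hr⟩
  have hlb : ¬ L.foldl (fun a x => min a (pvRk (PySem.Str.lower (PySem.Str.strip x)))) 10 ≤ i - 1 := by
    rw [pvMin_le_iff]
    push Not
    exact ⟨by omega, fun s hs => by have := hlo s hs; omega⟩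
  omega

-- ===== VERDICT (by name: the statement is the Claim_ definition above) =====
set_option maxHeartbeats 4000000 in
theorem emoji_for_tags_spec : Claim_equal_emoji_for_tags := by
  intro tags _
  unfold Spec_emoji_for_tags
  simp only [emoji_for_tags, emoji_for_tags_alt]
  have hseed : ((10 : Int), "🍽️") = ((10 : Int), pvEmojiOf 10) := by decide
  rw [hseed, pvFold_spec tags 10 (by norm_num) (by norm_num)]
  simp only [Bool.or_eq_true, PySem.Set.contains_iff, PySem.Set.mem_ofList, List.mem_map]
  split_ifs with h0 h1 h2 h3 h4 h5 h6 h7 h8 h9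
  · rw [pvMin_eq_of tags 0 (by omega)
    (Or.inr (by rcases h0 with ⟨y, hy, hn⟩ | ⟨y, hy, hn⟩ <;>
        exact ⟨y, hy, by rw [hn]; decide⟩))
    (by intro x hx
        refine pvRk_ge _ 0 (by omega) ?_
        intro p hp hlt heq
        rw [pvKeyword_items] at hp
        simp only [List.mem_cons, List.not_mem_nil, or_false] at hp
        rcases hp with rfl | rfl | rfl | rfl | rfl | rfl | rfl | rfl | rfl | rfl | rfl | rfl <;>
          simp at hlt <;>
          first
    | omega
    | exact h0 (Or.inl ⟨x, hx, heq.symm⟩)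
    | exact h0 (Or.inr ⟨x, hx, heq.symm⟩)
    | exact h1 ⟨x, hx, heq.symm⟩
    | exact h2 (Or.inl ⟨x, hx, heq.symm⟩)
    | exact h2 (Or.inr ⟨x, hx, heq.symm⟩)
    | exact h3 ⟨x, hx, heq.symm⟩
    | exact h4 ⟨x, hx, heq.symm⟩
    | exact h5 ⟨x, hx, heq.symm⟩
    | exact h6 ⟨x, hx, heq.symm⟩
    | exact h7 ⟨x, hx, heq.symm⟩
    | exact h8 ⟨x, hx, heq.symm⟩
    | exact h9 ⟨x, hx, heq.symm⟩)]
    decide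
  · rw [pvMin_eq_of tags 1 (by omega)
    (Or.inr (by obtain ⟨y, hy, hn⟩ := h1; exact ⟨y, hy, by rw [hn]; decide⟩))
    (by intro x hx
        refine pvRk_ge _ 1 (by omega) ?_
        intro p hp hlt heq
        rw [pvKeyword_items] at hp
        simp only [List.mem_cons, List.not_mem_nil, or_false] at hp
        rcases hp with rfl | rfl | rfl | rfl | rfl | rfl | rfl | rfl | rfl | rfl | rfl | rfl <;>
          simp at hlt <;>
          first
    | omega
    | exact h0 (Or.inl ⟨x, hx, heq.symm⟩)
    | exact h0 (Or.inr ⟨x, hx, heq.symm⟩)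
    | exact h1 ⟨x, hx, heq.symm⟩
    | exact h2 (Or.inl ⟨x, hx, heq.symm⟩)
    | exact h2 (Or.inr ⟨x, hx, heq.symm⟩)
    | exact h3 ⟨x, hx, heq.symm⟩
    | exact h4 ⟨x, hx, heq.symm⟩
    | exact h5 ⟨x, hx, heq.symm⟩
    | exact h6 ⟨x, hx, heq.symm⟩
    | exact h7 ⟨x, hx, heq.symm⟩
    | exact h8 ⟨x, hx, heq.symm⟩
    | exact h9 ⟨x, hx, heq.symm⟩)]
    decide
  · rw [pvMin_eq_of tags 2 (by omega)
    (Or.inr (by rcases h2 with ⟨y, hy, hn⟩ | ⟨y, hy, hn⟩ <;>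
        exact ⟨y, hy, by rw [hn]; decide⟩))
    (by intro x hx
        refine pvRk_ge _ 2 (by omega) ?_
        intro p hp hlt heq
        rw [pvKeyword_items] at hp
        simp only [List.mem_cons, List.not_mem_nil, or_false] at hp
        rcases hp with rfl | rfl | rfl | rfl | rfl | rfl | rfl | rfl | rfl | rfl | rfl | rfl <;>
          simp at hlt <;>
          first
    | omega
    | exact h0 (Or.inl ⟨x, hx, heq.symm⟩)
    | exact h0 (Or.inr ⟨x, hx, heq.symm⟩)
    | exact h1 ⟨x, hx, heq.symm⟩
    | exact h2 (Or.inl ⟨x, hx, heq.symm⟩)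
    | exact h2 (Or.inr ⟨x, hx, heq.symm⟩)
    | exact h3 ⟨x, hx, heq.symm⟩
    | exact h4 ⟨x, hx, heq.symm⟩
    | exact h5 ⟨x, hx, heq.symm⟩
    | exact h6 ⟨x, hx, heq.symm⟩
    | exact h7 ⟨x, hx, heq.symm⟩
    | exact h8 ⟨x, hx, heq.symm⟩
    | exact h9 ⟨x, hx, heq.symm⟩)]
    decide
  · rw [pvMin_eq_of tags 3 (by omega)
    (Or.inr (by obtain ⟨y, hy, hn⟩ := h3; exact ⟨y, hy, by rw [hn]; decide⟩))
    (by intro x hx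
        refine pvRk_ge _ 3 (by omega) ?_
        intro p hp hlt heq
        rw [pvKeyword_items] at hp
        simp only [List.mem_cons, List.not_mem_nil, or_false] at hp
        rcases hp with rfl | rfl | rfl | rfl | rfl | rfl | rfl | rfl | rfl | rfl | rfl | rfl <;>
          simp at hlt <;>
          first
    | omega
    | exact h0 (Or.inl ⟨x, hx, heq.symm⟩)
    | exact h0 (Or.inr ⟨x, hx, heq.symm⟩)
    | exact h1 ⟨x, hx, heq.symm⟩
    | exact h2 (Or.inl ⟨x, hx, heq.symm⟩)
    | exact h2 (Or.inr ⟨x, hx, heq.symm⟩)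
    | exact h3 ⟨x, hx, heq.symm⟩
    | exact h4 ⟨x, hx, heq.symm⟩
    | exact h5 ⟨x, hx, heq.symm⟩
    | exact h6 ⟨x, hx, heq.symm⟩
    | exact h7 ⟨x, hx, heq.symm⟩
    | exact h8 ⟨x, hx, heq.symm⟩
    | exact h9 ⟨x, hx, heq.symm⟩)]
    decide
  · rw [pvMin_eq_of tags 4 (by omega)
    (Or.inr (by obtain ⟨y, hy, hn⟩ := h4; exact ⟨y, hy, by rw [hn]; decide⟩))
    (by intro x hx
        refine pvRk_ge _ 4 (by omega) ?_
        intro p hp hlt heq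
        rw [pvKeyword_items] at hp
        simp only [List.mem_cons, List.not_mem_nil, or_false] at hp
        rcases hp with rfl | rfl | rfl | rfl | rfl | rfl | rfl | rfl | rfl | rfl | rfl | rfl <;>
          simp at hlt <;>
          first
    | omega
    | exact h0 (Or.inl ⟨x, hx, heq.symm⟩)
    | exact h0 (Or.inr ⟨x, hx, heq.symm⟩)
    | exact h1 ⟨x, hx, heq.symm⟩
    | exact h2 (Or.inl ⟨x, hx, heq.symm⟩)
    | exact h2 (Or.inr ⟨x, hx, heq.symm⟩)
    | exact h3 ⟨x, hx, heq.symm⟩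
    | exact h4 ⟨x, hx, heq.symm⟩
    | exact h5 ⟨x, hx, heq.symm⟩
    | exact h6 ⟨x, hx, heq.symm⟩
    | exact h7 ⟨x, hx, heq.symm⟩
    | exact h8 ⟨x, hx, heq.symm⟩
    | exact h9 ⟨x, hx, heq.symm⟩)]
    decide
  · rw [pvMin_eq_of tags 5 (by omega)
    (Or.inr (by obtain ⟨y, hy, hn⟩ := h5; exact ⟨y, hy, by rw [hn]; decide⟩))
    (by intro x hx
        refine pvRk_ge _ 5 (by omega) ?_
        intro p hp hlt heq
        rw [pvKeyword_items] at hp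
        simp only [List.mem_cons, List.not_mem_nil, or_false] at hp
        rcases hp with rfl | rfl | rfl | rfl | rfl | rfl | rfl | rfl | rfl | rfl | rfl | rfl <;>
          simp at hlt <;>
          first
    | omega
    | exact h0 (Or.inl ⟨x, hx, heq.symm⟩)
    | exact h0 (Or.inr ⟨x, hx, heq.symm⟩)
    | exact h1 ⟨x, hx, heq.symm⟩
    | exact h2 (Or.inl ⟨x, hx, heq.symm⟩)
    | exact h2 (Or.inr ⟨x, hx, heq.symm⟩)
    | exact h3 ⟨x, hx, heq.symm⟩
    | exact h4 ⟨x, hx, heq.symm⟩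
    | exact h5 ⟨x, hx, heq.symm⟩
    | exact h6 ⟨x, hx, heq.symm⟩
    | exact h7 ⟨x, hx, heq.symm⟩
    | exact h8 ⟨x, hx, heq.symm⟩
    | exact h9 ⟨x, hx, heq.symm⟩)]
    decide
  · rw [pvMin_eq_of tags 6 (by omega)
    (Or.inr (by obtain ⟨y, hy, hn⟩ := h6; exact ⟨y, hy, by rw [hn]; decide⟩))
    (by intro x hx
        refine pvRk_ge _ 6 (by omega) ?_
        intro p hp hlt heq
        rw [pvKeyword_items] at hp
        simp only [List.mem_cons, List.not_mem_nil, or_false] at hp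
        rcases hp with rfl | rfl | rfl | rfl | rfl | rfl | rfl | rfl | rfl | rfl | rfl | rfl <;>
          simp at hlt <;>
          first
    | omega
    | exact h0 (Or.inl ⟨x, hx, heq.symm⟩)
    | exact h0 (Or.inr ⟨x, hx, heq.symm⟩)
    | exact h1 ⟨x, hx, heq.symm⟩
    | exact h2 (Or.inl ⟨x, hx, heq.symm⟩)
    | exact h2 (Or.inr ⟨x, hx, heq.symm⟩)
    | exact h3 ⟨x, hx, heq.symm⟩
    | exact h4 ⟨x, hx, heq.symm⟩
    | exact h5 ⟨x, hx, heq.symm⟩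
    | exact h6 ⟨x, hx, heq.symm⟩
    | exact h7 ⟨x, hx, heq.symm⟩
    | exact h8 ⟨x, hx, heq.symm⟩
    | exact h9 ⟨x, hx, heq.symm⟩)]
    decide
  · rw [pvMin_eq_of tags 7 (by omega)
    (Or.inr (by obtain ⟨y, hy, hn⟩ := h7; exact ⟨y, hy, by rw [hn]; decide⟩))
    (by intro x hx
        refine pvRk_ge _ 7 (by omega) ?_
        intro p hp hlt heq
        rw [pvKeyword_items] at hp
        simp only [List.mem_cons, List.not_mem_nil, or_false] at hp
        rcases hp with rfl | rfl | rfl | rfl | rfl | rfl | rfl | rfl | rfl | rfl | rfl | rfl <;>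
          simp at hlt <;>
          first
    | omega
    | exact h0 (Or.inl ⟨x, hx, heq.symm⟩)
    | exact h0 (Or.inr ⟨x, hx, heq.symm⟩)
    | exact h1 ⟨x, hx, heq.symm⟩
    | exact h2 (Or.inl ⟨x, hx, heq.symm⟩)
    | exact h2 (Or.inr ⟨x, hx, heq.symm⟩)
    | exact h3 ⟨x, hx, heq.symm⟩
    | exact h4 ⟨x, hx, heq.symm⟩
    | exact h5 ⟨x, hx, heq.symm⟩
    | exact h6 ⟨x, hx, heq.symm⟩
    | exact h7 ⟨x, hx, heq.symm⟩
    | exact h8 ⟨x, hx, heq.symm⟩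
    | exact h9 ⟨x, hx, heq.symm⟩)]
    decide
  · rw [pvMin_eq_of tags 8 (by omega)
    (Or.inr (by obtain ⟨y, hy, hn⟩ := h8; exact ⟨y, hy, by rw [hn]; decide⟩))
    (by intro x hx
        refine pvRk_ge _ 8 (by omega) ?_
        intro p hp hlt heq
        rw [pvKeyword_items] at hp
        simp only [List.mem_cons, List.not_mem_nil, or_false] at hp
        rcases hp with rfl | rfl | rfl | rfl | rfl | rfl | rfl | rfl | rfl | rfl | rfl | rfl <;>
          simp at hlt <;>
          first
    | omega
    | exact h0 (Or.inl ⟨x, hx, heq.symm⟩)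
    | exact h0 (Or.inr ⟨x, hx, heq.symm⟩)
    | exact h1 ⟨x, hx, heq.symm⟩
    | exact h2 (Or.inl ⟨x, hx, heq.symm⟩)
    | exact h2 (Or.inr ⟨x, hx, heq.symm⟩)
    | exact h3 ⟨x, hx, heq.symm⟩
    | exact h4 ⟨x, hx, heq.symm⟩
    | exact h5 ⟨x, hx, heq.symm⟩
    | exact h6 ⟨x, hx, heq.symm⟩
    | exact h7 ⟨x, hx, heq.symm⟩
    | exact h8 ⟨x, hx, heq.symm⟩
    | exact h9 ⟨x, hx, heq.symm⟩)]
    decide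
  · rw [pvMin_eq_of tags 9 (by omega)
    (Or.inr (by obtain ⟨y, hy, hn⟩ := h9; exact ⟨y, hy, by rw [hn]; decide⟩))
    (by intro x hx
        refine pvRk_ge _ 9 (by omega) ?_
        intro p hp hlt heq
        rw [pvKeyword_items] at hp
        simp only [List.mem_cons, List.not_mem_nil, or_false] at hp
        rcases hp with rfl | rfl | rfl | rfl | rfl | rfl | rfl | rfl | rfl | rfl | rfl | rfl <;>
          simp at hlt <;>
          first
    | omega
    | exact h0 (Or.inl ⟨x, hx, heq.symm⟩)
    | exact h0 (Or.inr ⟨x, hx, heq.symm⟩)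
    | exact h1 ⟨x, hx, heq.symm⟩
    | exact h2 (Or.inl ⟨x, hx, heq.symm⟩)
    | exact h2 (Or.inr ⟨x, hx, heq.symm⟩)
    | exact h3 ⟨x, hx, heq.symm⟩
    | exact h4 ⟨x, hx, heq.symm⟩
    | exact h5 ⟨x, hx, heq.symm⟩
    | exact h6 ⟨x, hx, heq.symm⟩
    | exact h7 ⟨x, hx, heq.symm⟩
    | exact h8 ⟨x, hx, heq.symm⟩
    | exact h9 ⟨x, hx, heq.symm⟩)]
    decide
  · rw [pvMin_eq_of tags 10 le_rfl (Or.inl rfl)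
    (by intro x hx
        refine pvRk_ge _ 10 (by omega) ?_
        intro p hp hlt heq
        rw [pvKeyword_items] at hp
        simp only [List.mem_cons, List.not_mem_nil, or_false] at hp
        rcases hp with rfl | rfl | rfl | rfl | rfl | rfl | rfl | rfl | rfl | rfl | rfl | rfl <;>
          simp at hlt <;>
          first
    | omega
    | exact h0 (Or.inl ⟨x, hx, heq.symm⟩)
    | exact h0 (Or.inr ⟨x, hx, heq.symm⟩)
    | exact h1 ⟨x, hx, heq.symm⟩
    | exact h2 (Or.inl ⟨x, hx, heq.symm⟩)
    | exact h2 (Or.inr ⟨x, hx, heq.symm⟩)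
    | exact h3 ⟨x, hx, heq.symm⟩
    | exact h4 ⟨x, hx, heq.symm⟩
    | exact h5 ⟨x, hx, heq.symm⟩
    | exact h6 ⟨x, hx, heq.symm⟩
    | exact h7 ⟨x, hx, heq.symm⟩
    | exact h8 ⟨x, hx, heq.symm⟩
    | exact h9 ⟨x, hx, heq.symm⟩)]
    decide
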